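-- pv_equiv track=rewrite | github.com/Torie-Coding/snmp | tests/unit/plugins/modules/test_snmp_walk.py | _simulate_capped_walk
-- ===== SOURCE A (Python) =====
-- def _simulate_capped_walk(all_rows, max_results):
--     """Simulate the max_results capping logic from run_walk().
--
--     This mirrors the accumulation loop in snmp_poller.run_walk
--     (lines 118-147) so we can test the cap without a live agent.
--     """
--     rows = []
--     total_count = 0
--     for var_bind_table in all_rows:
--         rows.append(var_bind_table)
--         total_count += len(var_bind_table)
--         if 0 < max_results <= total_count:
--             break
--     return rows, total_count
-- ===== SOURCE B (Python) =====
-- from itertools import accumulate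
--
-- def _simulate_capped_walk(all_rows, max_results):
--     rows = list(all_rows)
--     cum = list(accumulate(map(len, rows)))
--     if max_results > 0:
--         for i, c in enumerate(cum):
--             if c >= max_results:
--                 return rows[:i + 1], c
--     return rows, (cum[-1] if cum else 0)
-- ===== Notes on version B (the rewrite author's own statement) =====
-- stated objective: alternative
-- what changed: Replaces A's single accumulation loop with early break by a prefix-sum (itertools.accumulate) over row lengths scanned for the first cumulative count reaching the cap, slicing the row list there.
import Mathlib
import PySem

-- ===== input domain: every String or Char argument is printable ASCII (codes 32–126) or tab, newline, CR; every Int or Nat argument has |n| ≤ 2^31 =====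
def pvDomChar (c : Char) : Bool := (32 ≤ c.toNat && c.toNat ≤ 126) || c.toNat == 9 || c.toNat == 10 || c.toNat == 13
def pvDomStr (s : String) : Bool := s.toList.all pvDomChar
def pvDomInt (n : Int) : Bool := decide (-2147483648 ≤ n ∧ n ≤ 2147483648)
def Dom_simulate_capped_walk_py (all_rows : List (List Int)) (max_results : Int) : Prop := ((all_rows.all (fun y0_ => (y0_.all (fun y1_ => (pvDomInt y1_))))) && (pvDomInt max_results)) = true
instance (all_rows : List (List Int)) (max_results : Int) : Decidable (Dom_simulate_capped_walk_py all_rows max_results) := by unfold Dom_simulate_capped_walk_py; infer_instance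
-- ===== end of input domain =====

-- ===== PORT A =====
-- A: accumulate rows and total_count, break when 0 < max_results <= total_count.
def simAuxA (rows : List (List Int)) (total : Int) (rest : List (List Int)) (mx : Int) :
    List (List Int) × Int :=
  match rest with
  | [] => (rows, total)
  | r :: rs =>
    let rows' := rows ++ [r]
    let total' := total + r.length
    if 0 < mx ∧ mx ≤ total' then (rows', total') else simAuxA rows' total' rs mx

def simulate_capped_walk_py (all_rows : List (List Int)) (max_results : Int) :
    List (List Int) × Int :=
  simAuxA [] 0 all_rows max_results

-- ===== PORT B =====
-- B: prefix sums of row lengths (itertools.accumulate), scan for first cumulative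
-- count reaching the cap, slice the row list there.
def cumAux (acc : Int) : List (List Int) → List Int
  | [] => []
  | r :: rs => (acc + r.length) :: cumAux (acc + r.length) rs

def findCut (mx : Int) : List Int → Option (Nat × Int)
  | [] => none
  | c :: cs =>
    if c ≥ mx then some (0, c)
    else
      match findCut mx cs with
      | some (i, c') => some (i + 1, c')
      | none => none

def simulate_capped_walk_py_alt (all_rows : List (List Int)) (max_results : Int) :
    List (List Int) × Int :=
  let cum := cumAux 0 all_rows
  if max_results > 0 then
    match findCut max_results cum with
    | some (i, c) => (all_rows.take (i + 1), c)
    | none => (all_rows, (cum.getLast?).getD 0)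
  else (all_rows, (cum.getLast?).getD 0)

-- ===== PRECONDITION & SPEC =====
def Spec_simulate_capped_walk_py (all_rows : List (List Int)) (max_results : Int) (out : List (List Int) × Int) : Prop := out = simulate_capped_walk_py_alt all_rows max_results
instance (all_rows : List (List Int)) (max_results : Int) (out : List (List Int) × Int) : Decidable (Spec_simulate_capped_walk_py all_rows max_results out) := by unfold Spec_simulate_capped_walk_py; infer_instance

-- ===== CLAIM (what is proved, stated in full; the proofs are below) =====
def Claim_equal_simulate_capped_walk_py : Prop := ∀ (all_rows : List (List Int)) (max_results : Int), Dom_simulate_capped_walk_py all_rows max_results → Spec_simulate_capped_walk_py all_rows max_results (simulate_capped_walk_py all_rows max_results)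

-- ===== LEMMAS AND PROOFS =====

theorem getLast_cons_getD (a : Int) (l : List Int) (d : Int) :
    ((a :: l).getLast?).getD d = (l.getLast?).getD a := by
  cases l with
  | nil => simp
  | cons b bs =>
    cases h : (b :: bs).getLast? with
    | none => simp [List.getLast?_eq_none_iff] at h
    | some x => simp [h]

theorem simAuxA_eq (mx : Int) (rest : List (List Int)) :
    ∀ (rows : List (List Int)) (total : Int),
      simAuxA rows total rest mx =
        if 0 < mx then
          match findCut mx (cumAux total rest) with
          | some (i, c) => (rows ++ rest.take (i + 1), c)
          | none => (rows ++ rest, ((cumAux total rest).getLast?).getD total)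
        else (rows ++ rest, ((cumAux total rest).getLast?).getD total) := by
  induction rest with
  | nil =>
    intro rows total
    simp [simAuxA, cumAux, findCut]
  | cons r rs ih =>
    intro rows total
    simp only [simAuxA, cumAux, findCut]
    by_cases hmx : 0 < mx
    · by_cases hc : total + (r.length : Int) ≥ mx
      · simp [hmx, hc]
      · have hcond : ¬ (0 < mx ∧ mx ≤ total + (r.length : Int)) := by
          intro h; exact hc h.2
        rw [if_neg hcond, ih (rows ++ [r]) (total + (r.length : Int))]
        rw [if_pos hmx, if_pos hmx, if_neg hc]
        cases h : findCut mx (cumAux (total + (r.length : Int)) rs) with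
        | none =>
          simp [getLast_cons_getD]
        | some p =>
          obtain ⟨i, c⟩ := p
          simp [List.take_succ_cons, List.append_assoc]
    · have hcond : ¬ (0 < mx ∧ mx ≤ total + (r.length : Int)) := by
        intro h; exact hmx h.1
      rw [if_neg hcond, ih (rows ++ [r]) (total + (r.length : Int))]
      rw [if_neg hmx, if_neg hmx]
      simp [getLast_cons_getD]

-- ===== VERDICT (by name: the statement is the Claim_ definition above) =====
theorem simulate_capped_walk_py_spec : Claim_equal_simulate_capped_walk_py := by
  intro all_rows mx _
  show simulate_capped_walk_py all_rows mx = simulate_capped_walk_py_alt all_rows mx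
  rw [simulate_capped_walk_py, simAuxA_eq]
  simp only [simulate_capped_walk_py_alt, gt_iff_lt]
  by_cases hmx : 0 < mx
  · rw [if_pos hmx, if_pos hmx]
    cases h : findCut mx (cumAux 0 all_rows) with
    | none => simp
    | some p => obtain ⟨i, c⟩ := p; simp
  · rw [if_neg hmx, if_neg hmx]
    simp
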